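-- pv_equiv track=rewrite | github.com/pypi-data/pypi-mirror-31 | packages/McKenneyCheckTags/McKenneyCheckTags-0.0.0-py2-none-any.whl/McKenneyCheckTags/checktags.py | checktags
-- ===== SOURCE A (Python) =====
-- def checktags(formtags):
--     i = 0
--     while i < len(formtags):
--         formtags[i] = formtags[i].lstrip()
--         formtags[i] = formtags[i].rstrip()
--         i += 1
--
--     i = 0
--     x = 1
--     duplicateTags = 0
--     if len(formtags) > 1:
--         while i < len(formtags) - 1:
--             x = i + 1
--             while x < len(formtags):
--                 if formtags[i] == formtags[x]:
--                     duplicateTags = 1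
--                     x += 1
--                 else:
--                     x += 1
--             i += 1
--
--
--     return duplicateTags
-- ===== SOURCE B (Python) =====
-- def checktags(formtags):
--     for i in range(len(formtags)):
--         formtags[i] = formtags[i].strip()
--     seen = set()
--     for t in formtags:
--         if t in seen:
--             return 1
--         seen.add(t)
--     return 0
-- ===== Notes on version B (the rewrite author's own statement) =====
-- stated objective: faster
-- what changed: Replaces A's nested quadratic pairwise scan with a single pass over the stripped tags using a seen-set, returning 1 at the first repeat.
import Mathlib
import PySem

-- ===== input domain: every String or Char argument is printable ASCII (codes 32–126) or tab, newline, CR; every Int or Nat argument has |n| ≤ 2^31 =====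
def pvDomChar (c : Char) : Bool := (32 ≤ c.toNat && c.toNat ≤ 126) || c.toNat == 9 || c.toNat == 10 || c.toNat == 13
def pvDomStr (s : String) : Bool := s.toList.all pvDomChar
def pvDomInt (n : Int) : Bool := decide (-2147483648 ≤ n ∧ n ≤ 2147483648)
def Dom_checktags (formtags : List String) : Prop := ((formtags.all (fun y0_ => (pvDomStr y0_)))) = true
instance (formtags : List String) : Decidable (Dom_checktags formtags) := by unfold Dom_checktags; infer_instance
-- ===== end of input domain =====

-- B replaces A's quadratic nested pairwise scan with one linear pass over a seen-set (faster);
-- both Pythons strip formtags' elements in place the same way; equivalence here is about the return value.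

-- ===== PORT A =====
def checktags (formtags : List String) : Int :=
  -- first while loop: strip each element in place (lstrip then rstrip)
  let fs := formtags.map (fun s => PySem.Str.rstrip (PySem.Str.lstrip s))
  -- nested while loops: duplicateTags flag threaded through both loops
  if (fs.length : Int) > 1 then
    (PySem.List.pyRange 0 ((fs.length : Int) - 1) 1).foldl (fun d i =>
      (PySem.List.pyRange (i + 1) (fs.length : Int) 1).foldl (fun d x =>
        if PySem.List.pyGetD fs i "" = PySem.List.pyGetD fs x "" then 1 else d) d) 0
  else 0

-- ===== PORT B =====
-- the 'for t in formtags: if t in seen: return 1; seen.add(t)' loop of Source B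
def altScan : List String → PySem.Set String → Int
  | [], _ => 0
  | t :: rest, seen =>
      if PySem.Set.contains seen t then 1 else altScan rest (PySem.Set.add seen t)

def checktags_alt (formtags : List String) : Int :=
  altScan (formtags.map PySem.Str.strip) PySem.Set.empty

-- ===== PRECONDITION & SPEC =====
def Spec_checktags (formtags : List String) (out : Int) : Prop := out = checktags_alt formtags
instance (formtags : List String) (out : Int) : Decidable (Spec_checktags formtags out) := by unfold Spec_checktags; infer_instance

-- ===== CLAIM (what is proved, stated in full; the proofs are below) =====
def Claim_equal_checktags : Prop := ∀ (formtags : List String), Dom_checktags formtags → Spec_checktags formtags (checktags formtags)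

-- ===== LEMMAS AND PROOFS =====

-- a fold that only ever overwrites the accumulator with 1 is a flag: 1 iff some element satisfies p
theorem foldl_flag {α : Type} (p : α → Prop) [DecidablePred p] (l : List α) (d : Int) :
    l.foldl (fun d x => if p x then 1 else d) d = if (∃ x ∈ l, p x) then 1 else d := by
  induction l generalizing d with
  | nil => simp
  | cons a t ih =>
    by_cases hp : p a
    · simp [hp, ih]
    · simp [hp, ih]

-- A's nested loops compute the "some duplicate pair" flag on fs
theorem checktags_eq_flag (formtags : List String) :
    checktags formtags =
      (if ¬ (formtags.map (fun s => PySem.Str.rstrip (PySem.Str.lstrip s))).Nodup then 1 else 0) := by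
  unfold checktags
  set fs := formtags.map (fun s => PySem.Str.rstrip (PySem.Str.lstrip s)) with hfs
  by_cases hn : (fs.length : Int) > 1
  · simp only [hn, if_true]
    have houter :
        (fun (d : Int) (i : Int) =>
          (PySem.List.pyRange (i + 1) (fs.length : Int) 1).foldl (fun d x =>
            if PySem.List.pyGetD fs i "" = PySem.List.pyGetD fs x "" then 1 else d) d)
        = fun (d : Int) (i : Int) =>
            @ite _ (∃ x ∈ PySem.List.pyRange (i + 1) (fs.length : Int) 1,
                PySem.List.pyGetD fs i "" = PySem.List.pyGetD fs x "")
              (List.decidableBEx _ _) 1 d := by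
      funext d i
      exact foldl_flag _ _ d
    rw [houter, foldl_flag]
    congr 1
    rw [eq_iff_iff]
    constructor
    · rintro ⟨i, hi, x, hx, hEq⟩
      rw [PySem.List.mem_pyRange_one] at hi hx
      intro hnd
      have h0i : 0 ≤ i := hi.1
      have h0x : 0 ≤ x := by omega
      have hilt : i < (fs.length : Int) := by omega
      have hxlt : x < (fs.length : Int) := hx.2
      rw [PySem.List.pyGetD_eq_getElem fs "" h0i hilt,
          PySem.List.pyGetD_eq_getElem fs "" h0x hxlt] at hEq
      have hij : i.toNat < x.toNat := by omega
      have hjl : x.toNat < fs.length := by omega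
      exact (List.nodup_iff_getElem?_ne_getElem?.1 hnd i.toNat x.toNat hij hjl)
        (by simp [hjl, (by omega : i.toNat < fs.length), hEq])
    · intro hnd
      rw [List.nodup_iff_getElem?_ne_getElem?] at hnd
      push Not at hnd
      obtain ⟨a, b, hab, hbl, hEq⟩ := hnd
      have hal : a < fs.length := by omega
      refine ⟨(a : Int), ?_, (b : Int), ?_, ?_⟩
      · rw [PySem.List.mem_pyRange_one]; omega
      · rw [PySem.List.mem_pyRange_one]; omega
      · rw [PySem.List.pyGetD_eq_getElem fs "" (by omega) (by exact_mod_cast hal),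
            PySem.List.pyGetD_eq_getElem fs "" (by omega) (by exact_mod_cast hbl)]
        simp only [Int.toNat_natCast]
        simpa [List.getElem?_eq_getElem, hal, hbl] using hEq
  · simp only [hn, if_false]
    have : fs.length ≤ 1 := by omega
    have hnd : fs.Nodup := by
      match fs, this with
      | [], _ => exact List.nodup_nil
      | [a], _ => exact List.nodup_singleton a
    simp [hnd]

-- B's seen-set pass returns 0 iff the remaining list is duplicate-free and disjoint from seen
theorem altScan_eq (l : List String) :
    ∀ s : PySem.Set String,
      altScan l s = if (l.Nodup ∧ ∀ t ∈ l, t ∉ s) then 0 else 1 := by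
  induction l with
  | nil => intro s; simp [altScan]
  | cons a t ih =>
    intro s
    by_cases hm : a ∈ s
    · have hc : PySem.Set.contains s a = true := (PySem.Set.contains_iff s a).2 hm
      have hno : ¬ ((a :: t).Nodup ∧ ∀ u ∈ a :: t, u ∉ s) := by
        rintro ⟨_, hall⟩
        exact hall a List.mem_cons_self hm
      simp only [altScan, hc, if_true]
      exact (if_neg hno).symm
    · have hc : PySem.Set.contains s a = false :=
        Bool.eq_false_iff.2 (fun h => hm ((PySem.Set.contains_iff s a).1 h))
      simp only [altScan, hc, Bool.false_eq_true, if_false]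
      rw [ih]
      congr 1
      rw [eq_iff_iff]
      constructor
      · rintro ⟨hnd, hall⟩
        refine ⟨List.nodup_cons.2
          ⟨fun ha => hall a ha ((PySem.Set.mem_add s a a).2 (Or.inr rfl)), hnd⟩, ?_⟩
        intro u hu
        rcases List.mem_cons.1 hu with hu | hu
        · subst hu; exact hm
        · exact fun hus => hall u hu ((PySem.Set.mem_add s a u).2 (Or.inl hus))
      · rintro ⟨hnd, hall⟩
        refine ⟨(List.nodup_cons.1 hnd).2, ?_⟩
        intro u hu hua
        rcases (PySem.Set.mem_add s a u).1 hua with hus | hue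
        · exact hall u (List.mem_cons_of_mem a hu) hus
        · subst hue; exact (List.nodup_cons.1 hnd).1 hu

theorem checktags_alt_eq_flag (formtags : List String) :
    checktags_alt formtags = (if ¬ (formtags.map PySem.Str.strip).Nodup then 1 else 0) := by
  unfold checktags_alt
  rw [altScan_eq]
  by_cases hnd : (formtags.map PySem.Str.strip).Nodup
  · simp [hnd, PySem.Set.empty]
  · simp [hnd]

theorem strip_eq_rl (s : String) :
    PySem.Str.strip s = PySem.Str.rstrip (PySem.Str.lstrip s) := by
  simp [PySem.Str.strip, PySem.Str.lstrip, PySem.Str.rstrip, PySem.Chars.strip]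

-- ===== VERDICT (by name: the statement is the Claim_ definition above) =====
theorem checktags_spec : Claim_equal_checktags := by
  intro formtags _
  unfold Spec_checktags
  have hmap : formtags.map PySem.Str.strip
      = formtags.map (fun s => PySem.Str.rstrip (PySem.Str.lstrip s)) :=
    List.map_congr_left (fun s _ => strip_eq_rl s)
  rw [checktags_eq_flag, checktags_alt_eq_flag, hmap]
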